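-- pv_equiv track=rewrite | github.com/jpalat/AdventOfCode-2020 | day11/day11.py | check_down2
-- ===== SOURCE A (Python) =====
-- def check_down2(row, col, floor):
--     edge = len(floor)
--     if row == len(floor) -1:
--         return 0
--     for r in range(row+1, edge):
--         if floor[r][col] == '#':
--             return 1
--         if floor[r][col] == 'L':
--             return 0
--     return 0
-- ===== SOURCE B (Python) =====
-- def _verdict(cells):
--     h = cells.index('#') if '#' in cells else -1
--     l = cells.index('L') if 'L' in cells else -1
--     return 1 if h != -1 and (l == -1 or h < l) else 0
--
--
-- def check_down2(row, col, floor):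
--     return _verdict([floor[r][col] for r in range(row + 1, len(floor))])
-- ===== Notes on version B (the rewrite author's own statement) =====
-- stated objective: alternative
-- what changed: A walks the column below with an early-exit loop; B materializes the below-column as a list and decides the answer by comparing the positions of the first '#' and the first 'L' found by two list.index searches.
-- outside the precondition, e.g. on check_down2(0, 0, [['x'], ['#'], []]): A returns 1, B raises IndexError
import Mathlib
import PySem

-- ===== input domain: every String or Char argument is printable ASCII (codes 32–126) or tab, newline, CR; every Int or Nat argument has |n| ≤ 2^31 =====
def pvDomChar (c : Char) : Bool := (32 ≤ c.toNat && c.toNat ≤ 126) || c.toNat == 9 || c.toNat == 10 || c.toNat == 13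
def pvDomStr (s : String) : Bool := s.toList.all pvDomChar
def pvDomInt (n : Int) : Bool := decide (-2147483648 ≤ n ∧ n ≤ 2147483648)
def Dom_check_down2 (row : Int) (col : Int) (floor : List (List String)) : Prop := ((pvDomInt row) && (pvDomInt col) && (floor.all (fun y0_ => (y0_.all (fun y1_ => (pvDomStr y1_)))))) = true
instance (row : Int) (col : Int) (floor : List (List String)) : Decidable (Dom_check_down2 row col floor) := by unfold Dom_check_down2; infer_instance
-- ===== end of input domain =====

-- B replaces A's early-exit scan with: materialize the below-column, then compare the
-- positions of the first '#' and the first 'L' (objective: alternative decomposition).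

-- ===== PORT A =====
-- the for-loop over range(row+1, edge) with early returns; pyGetD is exact under Pre_
-- (Pre_ guarantees every floor[r][col] in the scanned range exists)
def check_down2_loop (col : Int) (floor : List (List String)) : List Int → Int
  | [] => 0
  | r :: rs =>
    if PySem.List.pyGetD (PySem.List.pyGetD floor r []) col "" == "#" then 1
    else if PySem.List.pyGetD (PySem.List.pyGetD floor r []) col "" == "L" then 0
    else check_down2_loop col floor rs

def check_down2 (row : Int) (col : Int) (floor : List (List String)) : Int :=
  let edge : Int := floor.length
  if row == edge - 1 then 0
  else check_down2_loop col floor (PySem.List.pyRange (row + 1) edge 1)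

-- ===== PORT B =====
-- _verdict: two list.index searches plus a positional comparison
def check_down2_verdict (cells : List String) : Int :=
  let h : Int := match PySem.List.index? cells "#" with | some i => (i : Int) | none => -1
  let l : Int := match PySem.List.index? cells "L" with | some i => (i : Int) | none => -1
  if h ≠ -1 ∧ (l = -1 ∨ h < l) then 1 else 0

def check_down2_alt (row : Int) (col : Int) (floor : List (List String)) : Int :=
  check_down2_verdict
    ((PySem.List.pyRange (row + 1) (floor.length : Int) 1).map
      (fun r => PySem.List.pyGetD (PySem.List.pyGetD floor r []) col ""))

-- ===== PRECONDITION & SPEC =====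
-- Pre_ excludes the inputs on which a lookup floor[r][col] in the below-range raises
-- (IndexError). This is slightly narrower than where A returns: on a ragged floor A may
-- hit '#'/'L' and return before reaching an out-of-range row, while B materializes the
-- whole column and raises there (see claim.json cites). Closed form of "every scanned
-- floor[r][col] exists": the scan is empty when len <= row+1; it starts at r = row+1,
-- which must not be below -len; a negative start wraps around and ends up visiting
-- every row; a nonnegative start visits the rows from row+1 on.
def Pre_check_down2 (row : Int) (col : Int) (floor : List (List String)) : Prop :=
  (floor.length : Int) ≤ row + 1 ∨
    (-(floor.length : Int) ≤ row + 1 ∧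
      ((row + 1 < 0 ∧ ∀ rw ∈ floor, PySem.Raise.InRange rw.length col) ∨
        (0 ≤ row + 1 ∧ ∀ rw ∈ floor.drop (row + 1).toNat, PySem.Raise.InRange rw.length col)))
instance (row : Int) (col : Int) (floor : List (List String)) : Decidable (Pre_check_down2 row col floor) := by unfold Pre_check_down2; infer_instance

def pvWitness_check_down2 : Int × Int × List (List String) := (0, 0, [["."], ["#"]])

def Spec_check_down2 (row : Int) (col : Int) (floor : List (List String)) (out : Int) : Prop := out = check_down2_alt row col floor
instance (row : Int) (col : Int) (floor : List (List String)) (out : Int) : Decidable (Spec_check_down2 row col floor out) := by unfold Spec_check_down2; infer_instance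

-- ===== CLAIM (what is proved, stated in full; the proofs are below) =====
def Claim_equal_check_down2 : Prop := ∀ (row : Int) (col : Int) (floor : List (List String)), Dom_check_down2 row col floor → Pre_check_down2 row col floor → Spec_check_down2 row col floor (check_down2 row col floor)

-- ===== LEMMAS AND PROOFS =====

lemma check_down2_verdict_cons (c : String) (cells : List String) :
    check_down2_verdict (c :: cells) =
      if c == "#" then 1 else if c == "L" then 0 else check_down2_verdict cells := by
  by_cases h1 : c = "#"
  · subst h1
    unfold check_down2_verdict
    rw [PySem.List.index?_cons_self "#" cells,
        PySem.List.index?_cons_of_ne (x := "#") (v := "L") cells (by decide)]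
    rcases PySem.List.index? cells "L" with _ | j <;> simp
  · by_cases h2 : c = "L"
    · subst h2
      unfold check_down2_verdict
      rw [PySem.List.index?_cons_self "L" cells,
          PySem.List.index?_cons_of_ne (x := "L") (v := "#") cells (by decide)]
      rcases PySem.List.index? cells "#" with _ | i <;> simp <;> omega
    · unfold check_down2_verdict
      rw [PySem.List.index?_cons_of_ne (x := c) (v := "#") cells h1,
          PySem.List.index?_cons_of_ne (x := c) (v := "L") cells h2]
      simp only [beq_iff_eq, h1, h2, if_false]
      rcases PySem.List.index? cells "#" with _ | i <;>
        rcases PySem.List.index? cells "L" with _ | j <;>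
          simp
      · omega
      · split_ifs <;> omega

lemma check_down2_loop_eq (col : Int) (floor : List (List String)) (rs : List Int) :
    check_down2_loop col floor rs =
      check_down2_verdict
        (rs.map (fun r => PySem.List.pyGetD (PySem.List.pyGetD floor r []) col "")) := by
  induction rs with
  | nil => rfl
  | cons r rs ih =>
    rw [List.map_cons, check_down2_verdict_cons]
    unfold check_down2_loop
    rw [ih]

theorem check_down2_spec : Claim_equal_check_down2 := by
  intro row col floor _ _
  unfold Spec_check_down2 check_down2 check_down2_alt
  by_cases h : row == (floor.length : Int) - 1
  · simp only [h, if_true]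
    have : PySem.List.pyRange (row + 1) (floor.length : Int) 1 = [] := by
      apply PySem.List.pyRange_one_eq_nil
      have := beq_iff_eq.mp h
      omega
    rw [this]
    rfl
  · simp only [h, if_false]
    exact check_down2_loop_eq col floor _
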